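-- pv_equiv track=rewrite | github.com/nathan29849/TIL | 03_Python/sparta_algorithm/week_1/homework/02_find_count_to_turn_out_to_all_zero_or_all_one.py | find_count_to_turn_out_to_all_zero_or_all_one
-- ===== SOURCE A (Python) =====
-- def find_count_to_turn_out_to_all_zero_or_all_one(string):
--     # 이 부분을 채워보세요!
--     overlap = 0
--     count = 0
--     for i in range(1, len(string)):
--         if string[i-1] == string[i]:
--             continue
--         else:   # string[i-1] != string[i]
--             count += 1
--             if string[i] != string[-1]:
--                 overlap += 1
--
--     return count-overlap
-- ===== SOURCE B (Python) =====
-- def find_count_to_turn_out_to_all_zero_or_all_one(string):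
--     # Collapse the string into its list of run keys (one char per maximal run),
--     # then the answer is the number of runs after the first whose character
--     # equals the last character.
--     keys = []
--     for ch in string:
--         if not keys or keys[-1] != ch:
--             keys.append(ch)
--     return keys[1:].count(keys[-1]) if keys else 0
-- ===== Notes on version B (the rewrite author's own statement) =====
-- stated objective: alternative
-- what changed: B replaces A's two interdependent counters over adjacent index pairs (with a string[-1] comparison per mismatch) by first collapsing the string into its list of run keys and then counting, among the runs after the first, those whose character equals the last character.
import Mathlib
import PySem

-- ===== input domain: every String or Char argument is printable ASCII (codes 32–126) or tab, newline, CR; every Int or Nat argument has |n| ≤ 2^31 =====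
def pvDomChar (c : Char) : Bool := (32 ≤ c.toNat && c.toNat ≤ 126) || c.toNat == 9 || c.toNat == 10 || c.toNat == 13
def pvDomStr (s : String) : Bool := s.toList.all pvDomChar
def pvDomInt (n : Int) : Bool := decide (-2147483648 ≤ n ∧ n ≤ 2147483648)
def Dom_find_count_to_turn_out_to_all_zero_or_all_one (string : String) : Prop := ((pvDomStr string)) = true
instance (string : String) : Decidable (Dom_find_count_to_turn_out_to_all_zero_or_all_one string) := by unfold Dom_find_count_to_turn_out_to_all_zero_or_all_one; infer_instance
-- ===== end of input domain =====

-- B collapses the string to its run-key list and counts later runs equal to the last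
-- character, replacing A's paired counters over adjacent indices (alternative algorithm).


-- ===== PORT A =====
-- the 'match' arm '| _, _, _ => oc' is unreachable: every index drawn from
-- range(1, len) and -1 on a then-nonempty string is in range, so Python never raises here
def find_count_to_turn_out_to_all_zero_or_all_one (string : String) : Int :=
  let l := string.toList
  let st :=
    (PySem.List.pyRange 1 (l.length : Int) 1).foldl
      (fun (oc : Int × Int) i =>
        match PySem.List.pyGet? l (i - 1), PySem.List.pyGet? l i, PySem.List.pyGet? l (-1) with
        | some a, some b, some z =>
            if a = b then oc
            else if b ≠ z then (oc.1 + 1, oc.2 + 1) else (oc.1, oc.2 + 1)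
        | _, _, _ => oc)
      ((0 : Int), (0 : Int))
  st.2 - st.1

-- ===== PORT B =====
def find_count_to_turn_out_to_all_zero_or_all_one_alt (string : String) : Int :=
  let keys :=
    string.toList.foldl
      (fun (keys : List Char) ch =>
        if keys = [] ∨ keys.getLast? ≠ some ch then keys ++ [ch] else keys)
      []
  match keys.getLast? with
  | some z => ((keys.drop 1).count z : Int)
  | none => 0

-- ===== PRECONDITION & SPEC =====
def Spec_find_count_to_turn_out_to_all_zero_or_all_one (string : String) (out : Int) : Prop := out = find_count_to_turn_out_to_all_zero_or_all_one_alt string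
instance (string : String) (out : Int) : Decidable (Spec_find_count_to_turn_out_to_all_zero_or_all_one string out) := by unfold Spec_find_count_to_turn_out_to_all_zero_or_all_one; infer_instance

-- ===== CLAIM (what is proved, stated in full; the proofs are below) =====
def Claim_equal_find_count_to_turn_out_to_all_zero_or_all_one : Prop := ∀ (string : String), Dom_find_count_to_turn_out_to_all_zero_or_all_one string → Spec_find_count_to_turn_out_to_all_zero_or_all_one string (find_count_to_turn_out_to_all_zero_or_all_one string)

-- ===== LEMMAS AND PROOFS =====

-- last element of a nonempty list, fold style
def pvLastD (a : Char) : List Char → Char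
  | [] => a
  | b :: t => pvLastD b t

-- adjacent pairs of a list
def pvAdj : List Char → List (Char × Char)
  | [] => []
  | [_] => []
  | a :: b :: t => (a, b) :: pvAdj (b :: t)

-- run starts equal to z, walking with previous char
def pvG (prev : Char) (t : List Char) (z : Char) : Nat :=
  match t with
  | [] => 0
  | c :: t' => (if prev ≠ c ∧ c = z then 1 else 0) + pvG c t' z

-- keys appended by B's fold after the first run
def pvNewKeys (prev : Char) : List Char → List Char
  | [] => []
  | c :: t => if prev ≠ c then c :: pvNewKeys c t else pvNewKeys c t

theorem pvLastD_eq_getLast? (t : List Char) : ∀ a, (a :: t).getLast? = some (pvLastD a t) := by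
  induction t with
  | nil => intro a; rfl
  | cons b t ih => intro a; rw [List.getLast?_cons_cons]; exact ih b

theorem pvAdj_snoc (rest : List Char) : ∀ (a y : Char),
    pvAdj ((a :: rest) ++ [y]) = pvAdj (a :: rest) ++ [(pvLastD a rest, y)] := by
  induction rest with
  | nil => intro a y; rfl
  | cons b r ih =>
    intro a y
    have h := ih b y
    simp only [List.cons_append] at h ⊢
    rw [pvAdj, pvAdj, h]
    rfl

theorem pvGet_append_left (l : List Char) (y : Char) (i : Int) (h0 : 0 ≤ i)
    (h1 : i < l.length) : PySem.List.pyGet? (l ++ [y]) i = PySem.List.pyGet? l i := by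
  rw [PySem.List.pyGet?_of_nonneg _ h0, PySem.List.pyGet?_of_nonneg _ h0]
  have hlt : i.toNat < l.length := by omega
  rw [List.getElem?_append_left hlt]

-- A's index loop over range(1, len) visits exactly the adjacent pairs
theorem pvPairFold {σ : Type} (f : σ → Char → Char → σ) (l : List Char) (init : σ) :
    (PySem.List.pyRange 1 (l.length : Int) 1).foldl
      (fun acc i =>
        match PySem.List.pyGet? l (i - 1), PySem.List.pyGet? l i with
        | some a, some b => f acc a b
        | _, _ => acc) init
    = (pvAdj l).foldl (fun acc p => f acc p.1 p.2) init := by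
  induction l using List.reverseRecOn with
  | nil => simp [PySem.List.pyRange_one_eq_nil, pvAdj]
  | append_singleton l y ih =>
    cases l with
    | nil => simp [pvAdj]
    | cons a rest =>
      have hb : (1 : Int) ≤ ((a :: rest).length : Int) := by
        push_cast [List.length_cons]; omega
      have hlen : (((a :: rest) ++ [y]).length : Int) = ((a :: rest).length : Int) + 1 := by
        simp
      rw [hlen, PySem.List.pyRange_one_succ_right (by omega), List.foldl_append]
      have hcongr :
          (PySem.List.pyRange 1 ((a :: rest).length : Int) 1).foldl
            (fun acc i =>
              match PySem.List.pyGet? ((a :: rest) ++ [y]) (i - 1),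
                    PySem.List.pyGet? ((a :: rest) ++ [y]) i with
              | some a', some b => f acc a' b
              | _, _ => acc) init
          = (PySem.List.pyRange 1 ((a :: rest).length : Int) 1).foldl
            (fun acc i =>
              match PySem.List.pyGet? (a :: rest) (i - 1), PySem.List.pyGet? (a :: rest) i with
              | some a', some b => f acc a' b
              | _, _ => acc) init := by
        apply PySem.List.foldl_congr_mem
        intro acc i hi
        rw [PySem.List.mem_pyRange_one] at hi
        rw [pvGet_append_left _ _ _ (by omega) (by omega),
            pvGet_append_left _ _ _ (by omega) (by omega)]
      rw [hcongr, ih, pvAdj_snoc, List.foldl_append]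
      simp only [List.foldl_cons, List.foldl_nil]
      have h1 : PySem.List.pyGet? ((a :: rest) ++ [y]) (((a :: rest).length : Int) - 1)
          = some (pvLastD a rest) := by
        rw [pvGet_append_left _ _ _ (by omega) (by omega),
            PySem.List.pyGet?_of_nonneg _ (by omega)]
        have hlast := pvLastD_eq_getLast? rest a
        rw [List.getLast?_eq_getElem?] at hlast
        have ht : (((a :: rest).length : Int) - 1).toNat = (a :: rest).length - 1 := by omega
        rw [ht]
        exact hlast
      have h2 : PySem.List.pyGet? ((a :: rest) ++ [y]) ((a :: rest).length : Int) = some y :=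
        PySem.List.pyGet?_append_length _ _ _
      rw [h1, h2]

-- the pair predicate "mismatch whose right char is z"
def pvP (z : Char) (p : Char × Char) : Bool := !(p.1 == p.2) && (p.2 == z)

-- count − overlap over A's pair fold is a countP
theorem pvDiffFold (z : Char) (ps : List (Char × Char)) : ∀ (o c : Int),
    (ps.foldl
      (fun (oc : Int × Int) p =>
        if p.1 = p.2 then oc
        else if p.2 ≠ z then (oc.1 + 1, oc.2 + 1) else (oc.1, oc.2 + 1)) (o, c)).2
    - (ps.foldl
      (fun (oc : Int × Int) p =>
        if p.1 = p.2 then oc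
        else if p.2 ≠ z then (oc.1 + 1, oc.2 + 1) else (oc.1, oc.2 + 1)) (o, c)).1
    = c - o + (ps.countP (pvP z) : Int) := by
  induction ps with
  | nil => intro o c; simp
  | cons p ps ih =>
    intro o c
    simp only [List.foldl_cons]
    by_cases h1 : p.1 = p.2
    · rw [if_pos h1, ih, List.countP_cons]
      simp [pvP, h1]
    · by_cases h2 : p.2 = z
      · have hp : pvP z p = true := by simp [pvP]; exact ⟨h1, h2⟩
        rw [if_neg h1, if_neg (by simpa using h2), ih, List.countP_cons, hp]
        simp only [if_pos rfl]
        push_cast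
        omega
      · have hp : pvP z p = false := by simp [pvP, h2]
        rw [if_neg h1, if_pos (by simpa using h2), ih, List.countP_cons, hp]
        simp only [Bool.false_eq_true, if_false]
        push_cast
        omega

theorem pvAdjCountP (z : Char) (t : List Char) : ∀ h : Char,
    (pvAdj (h :: t)).countP (pvP z) = pvG h t z := by
  induction t with
  | nil => intro h; simp [pvAdj, pvG]
  | cons c t ih =>
    intro h
    rw [show pvAdj (h :: c :: t) = (h, c) :: pvAdj (c :: t) from rfl,
        List.countP_cons, ih c]
    rw [show pvG h (c :: t) z = (if h ≠ c ∧ c = z then 1 else 0) + pvG c t z from rfl]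
    by_cases hc : h = c <;> by_cases hz : c = z <;> simp [pvP, hc, hz] <;> omega

-- B's fold from a nonempty accumulator appends exactly the new run keys
theorem pvKeysFold (t : List Char) : ∀ (acc : List Char) (prev : Char),
    acc.getLast? = some prev →
    t.foldl
      (fun (keys : List Char) ch =>
        if keys = [] ∨ keys.getLast? ≠ some ch then keys ++ [ch] else keys) acc
    = acc ++ pvNewKeys prev t := by
  induction t with
  | nil => intro acc prev _; simp [pvNewKeys]
  | cons c t ih =>
    intro acc prev hlast
    have hne : acc ≠ [] := by intro h; rw [h] at hlast; simp at hlast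
    by_cases hc : prev = c
    · have : ¬ (acc = [] ∨ acc.getLast? ≠ some c) := by
        push_neg; exact ⟨hne, by rw [hlast, hc]⟩
      simp only [List.foldl_cons, if_neg this]
      rw [ih acc prev hlast, pvNewKeys, if_neg (by simp [hc]), hc]
    · have : acc = [] ∨ acc.getLast? ≠ some c := by
        right; rw [hlast]; simp [hc]
      simp only [List.foldl_cons, if_pos this]
      rw [ih (acc ++ [c]) c (by simp), pvNewKeys, if_pos hc, List.append_assoc]
      simp

theorem pvNewKeysCount (z : Char) (t : List Char) : ∀ prev : Char,
    (pvNewKeys prev t).count z = pvG prev t z := by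
  induction t with
  | nil => intro prev; simp [pvNewKeys, pvG]
  | cons c t ih =>
    intro prev
    by_cases hc : prev = c
    · simp [pvNewKeys, pvG, hc, ih c]
    · by_cases hz : c = z
      · subst hz
        rw [show pvNewKeys prev (c :: t) = c :: pvNewKeys c t from by
              rw [pvNewKeys, if_pos hc],
            show pvG prev (c :: t) c = 1 + pvG c t c from by
              simp [pvG, hc]]
        simp [List.count_cons, ih c]
        omega
      · rw [show pvNewKeys prev (c :: t) = c :: pvNewKeys c t from by
              rw [pvNewKeys, if_pos hc],
            show pvG prev (c :: t) z = pvG c t z from by simp [pvG, hz]]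
        simp [List.count_cons, ih c, hz]

theorem pvNewKeysLast (t : List Char) : ∀ prev : Char,
    (prev :: pvNewKeys prev t).getLast? = some (pvLastD prev t) := by
  induction t with
  | nil => intro prev; simp [pvNewKeys, pvLastD]
  | cons c t ih =>
    intro prev
    by_cases hc : prev = c
    · rw [pvNewKeys, if_neg (by simp [hc]), pvLastD, hc]
      exact ih c
    · rw [pvNewKeys, if_pos hc, pvLastD]
      have := ih c
      rw [List.getLast?_cons_cons] at *
      cases hnk : pvNewKeys c t with
      | nil => rw [hnk] at this; simpa using this
      | cons x xs => rw [hnk] at this; simpa using this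

-- the key fact about B on a nonempty string
theorem pvAltChar (s : String) (h : Char) (t : List Char) (hs : s.toList = h :: t) :
    find_count_to_turn_out_to_all_zero_or_all_one_alt s
    = (pvG h t (pvLastD h t) : Int) := by
  unfold find_count_to_turn_out_to_all_zero_or_all_one_alt
  rw [hs, List.foldl_cons]
  have hstep : (if ([] : List Char) = [] ∨ ([] : List Char).getLast? ≠ some h then ([] : List Char) ++ [h] else []) = [h] := by simp
  rw [hstep, pvKeysFold t [h] h (by simp)]
  have hlast : (([h] : List Char) ++ pvNewKeys h t).getLast? = some (pvLastD h t) := by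
    simpa using pvNewKeysLast t h
  show (match ([h] ++ pvNewKeys h t).getLast? with
        | some z => ((List.count z (List.drop 1 ([h] ++ pvNewKeys h t))) : Int)
        | none => 0) = ((pvG h t (pvLastD h t) : Nat) : Int)
  rw [hlast]
  simp only [List.singleton_append, List.drop_succ_cons, List.drop_zero]
  rw [pvNewKeysCount]

-- ===== VERDICT (by name: the statement is the Claim_ definition above) =====
theorem find_count_to_turn_out_to_all_zero_or_all_one_spec : Claim_equal_find_count_to_turn_out_to_all_zero_or_all_one := by
  intro s _
  unfold Spec_find_count_to_turn_out_to_all_zero_or_all_one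
  cases hs : s.toList with
  | nil =>
    unfold find_count_to_turn_out_to_all_zero_or_all_one
      find_count_to_turn_out_to_all_zero_or_all_one_alt
    rw [hs]
    simp [PySem.List.pyRange_one_eq_nil]
  | cons h t =>
    rw [pvAltChar s h t hs]
    unfold find_count_to_turn_out_to_all_zero_or_all_one
    simp only [hs]
    have hneg : PySem.List.pyGet? (h :: t) (-1) = some (pvLastD h t) := by
      rw [PySem.List.pyGet?_neg_one]; exact pvLastD_eq_getLast? t h
    simp only [hneg]
    have hfold :
        List.foldl
          (fun (oc : Int × Int) i =>
            match PySem.List.pyGet? (h :: t) (i - 1), PySem.List.pyGet? (h :: t) i,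
                  some (pvLastD h t) with
            | some a, some b, some z =>
                if a = b then oc
                else if b ≠ z then (oc.1 + 1, oc.2 + 1) else (oc.1, oc.2 + 1)
            | _, _, _ => oc)
          ((0 : Int), (0 : Int)) (PySem.List.pyRange 1 (((h :: t).length : Int)) 1)
        = List.foldl
          (fun (oc : Int × Int) i =>
            match PySem.List.pyGet? (h :: t) (i - 1), PySem.List.pyGet? (h :: t) i with
            | some a, some b =>
                if a = b then oc
                else if b ≠ pvLastD h t then (oc.1 + 1, oc.2 + 1) else (oc.1, oc.2 + 1)
            | _, _ => oc)
          ((0 : Int), (0 : Int)) (PySem.List.pyRange 1 (((h :: t).length : Int)) 1) := by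
      apply PySem.List.foldl_congr_mem
      intro acc i _
      cases PySem.List.pyGet? (h :: t) (i - 1) <;> cases PySem.List.pyGet? (h :: t) i <;> rfl
    rw [hfold]
    rw [pvPairFold
      (fun (oc : Int × Int) a b =>
        if a = b then oc
        else if b ≠ pvLastD h t then (oc.1 + 1, oc.2 + 1) else (oc.1, oc.2 + 1))
      (h :: t) ((0 : Int), (0 : Int))]
    rw [pvDiffFold, pvAdjCountP]
    simp
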